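-- pv_equiv track=rewrite | github.com/icarys29/at | scripts/maintenance/self_audit.py | _collapse_block_scalars
-- ===== SOURCE A (Python) =====
-- def _count_indent(raw: str) -> int:
--     return len(raw) - len(raw.lstrip(" "))
--
-- def _escape_yaml_double_quoted(value: str) -> str:
--     return value.replace("\\", "\\\\").replace('"', '\\"')
--
-- def _collapse_block_scalars(frontmatter: str) -> str:
--     """
--     Convert YAML block scalars (>, |) into quoted scalar strings so they can be
--     parsed by lib.simple_yaml.load_minimal_yaml (which intentionally supports a
--     smaller YAML subset).
--     """
--     lines = frontmatter.splitlines()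
--     out: list[str] = []
--     i = 0
--     while i < len(lines):
--         raw = lines[i]
--         stripped = raw.lstrip(" ")
--         indent = _count_indent(raw)
--         # Preserve comments/blank lines for stable error reporting.
--         if not stripped or stripped.startswith("#"):
--             out.append(raw)
--             i += 1
--             continue
--         if ":" not in stripped:
--             out.append(raw)
--             i += 1
--             continue
--         key, rest = stripped.split(":", 1)
--         key = key.strip()
--         rest = rest.lstrip(" ")
--         if key and rest and rest[0] in {"|", ">"}:
--             style = rest[0]
--             j = i + 1
--             block_lines: list[str] = []
--             while j < len(lines):
--                 nxt = lines[j]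
--                 if not nxt.strip():
--                     block_lines.append("")
--                     j += 1
--                     continue
--                 nxt_indent = _count_indent(nxt)
--                 if nxt_indent <= indent:
--                     break
--                 block_lines.append(nxt)
--                 j += 1
--             content_indent = None
--             for bl in block_lines:
--                 if not isinstance(bl, str) or not bl.strip():
--                     continue
--                 content_indent = _count_indent(bl) if content_indent is None else min(content_indent, _count_indent(bl))
--             norm: list[str] = []
--             for bl in block_lines:
--                 if not bl:
--                     norm.append("")
--                     continue
--                 if content_indent is None:
--                     norm.append(bl.lstrip(" "))
--                 else:
--                     norm.append(bl[content_indent:] if len(bl) >= content_indent else bl.lstrip(" "))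
--             if style == "|":
--                 value = "\n".join(norm).strip()
--             else:
--                 value = " ".join([x.strip() for x in norm if x.strip()]).strip()
--             out.append(" " * indent + f'{key}: "{_escape_yaml_double_quoted(value)}"')
--             i = j
--             continue
--
--         out.append(raw)
--         i += 1
--     return "\n".join(out) + "\n"
-- ===== SOURCE B (Python) =====
-- # B: one flat single-pass state machine over the lines (scan mode / block mode with
-- # an explicit flush), instead of A's outer index loop with a nested block-scanning loop.
--
-- def _count_indent(raw: str) -> int:
--     return len(raw) - len(raw.lstrip(" "))
--
-- def _escape_yaml_double_quoted(value: str) -> str: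
--     return value.replace("\\", "\\\\").replace('"', '\\"')
--
-- def _classify(raw):
--     """Return (indent, key, style) if raw opens a block scalar, else None."""
--     stripped = raw.lstrip(" ")
--     if not stripped or stripped.startswith("#"):
--         return None
--     if ":" not in stripped:
--         return None
--     key, rest = stripped.split(":", 1)
--     key = key.strip()
--     rest = rest.lstrip(" ")
--     if key and rest and rest[0] in {"|", ">"}:
--         return (_count_indent(raw), key, rest[0])
--     return None
--
-- def _finish_block(indent, key, style, block_lines):
--     content_indent = None
--     for bl in block_lines:
--         if not bl.strip():
--             continue
--         ci = _count_indent(bl)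
--         content_indent = ci if content_indent is None else min(content_indent, ci)
--     norm = []
--     for bl in block_lines:
--         if not bl:
--             norm.append("")
--         elif content_indent is None:
--             norm.append(bl.lstrip(" "))
--         else:
--             norm.append(bl[content_indent:] if len(bl) >= content_indent else bl.lstrip(" "))
--     if style == "|":
--         value = "\n".join(norm).strip()
--     else:
--         value = " ".join([x.strip() for x in norm if x.strip()]).strip()
--     return " " * indent + f'{key}: "{_escape_yaml_double_quoted(value)}"'
--
-- def _collapse_block_scalars(frontmatter: str) -> str:
--     out = []
--     blk = None  # (indent, key, style, body-lines) while inside a block scalar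
--     for line in frontmatter.splitlines():
--         if blk is not None:
--             indent, key, style, acc = blk
--             if not line.strip():
--                 acc.append("")
--                 continue
--             if _count_indent(line) > indent:
--                 acc.append(line)
--                 continue
--             out.append(_finish_block(indent, key, style, acc))
--             blk = None
--         c = _classify(line)
--         if c is None:
--             out.append(line)
--         else:
--             blk = (c[0], c[1], c[2], [])
--     if blk is not None:
--         out.append(_finish_block(*blk))
--     return "\n".join(out) + "\n"
-- ===== Notes on version B (the rewrite author's own statement) =====
-- stated objective: alternative
-- what changed: Replaced A's outer index loop with a nested inner loop that scans each block scalar's body by a flat single-pass state machine (scan mode / block mode with an explicit end-of-input flush) over the lines.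
import Mathlib
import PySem

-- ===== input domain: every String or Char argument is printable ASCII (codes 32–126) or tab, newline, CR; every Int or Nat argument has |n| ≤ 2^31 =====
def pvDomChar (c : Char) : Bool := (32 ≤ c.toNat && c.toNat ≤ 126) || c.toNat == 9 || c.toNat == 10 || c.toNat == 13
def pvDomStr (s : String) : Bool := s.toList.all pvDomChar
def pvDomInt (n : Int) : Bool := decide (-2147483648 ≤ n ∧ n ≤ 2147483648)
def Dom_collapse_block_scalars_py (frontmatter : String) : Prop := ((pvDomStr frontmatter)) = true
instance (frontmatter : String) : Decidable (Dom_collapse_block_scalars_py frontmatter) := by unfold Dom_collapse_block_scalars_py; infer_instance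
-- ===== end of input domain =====

-- B replaces A's outer index loop with nested block scan by a flat single-pass state machine with an explicit flush; return values proved equal.

-- shared module helpers (_count_indent, _escape_yaml_double_quoted, and the
-- collapse-and-quote step both Python versions perform with identical code)

-- _count_indent: len(raw) - len(raw.lstrip(" ")); lstrip(" ") is dropWhile (· == ' ') (hand port, exact: strips SPACES only)
def pvCountIndent (cs : List Char) : Nat := cs.length - (cs.dropWhile (· == ' ')).length

def pvEscape (v : List Char) : List Char :=
  PySem.Chars.replace (PySem.Chars.replace v ['\\'] ['\\', '\\']) ['"'] ['\\', '"']

-- content_indent accumulation loop over block_lines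
def pvContentIndent (bls : List (List Char)) : Option Nat :=
  bls.foldl (fun ci bl =>
    if PySem.Chars.strip bl = [] then ci
    else match ci with
      | none => some (pvCountIndent bl)
      | some m => some (min m (pvCountIndent bl))) none

-- the normalise / join / quote emission step (identical in both Pythons)
def pvEmit (indent : Nat) (key : List Char) (style : Char) (bls : List (List Char)) : List Char :=
  let ci := pvContentIndent bls
  let norm := bls.map (fun bl =>
    if bl = [] then ([] : List Char)
    else match ci with
      | none => bl.dropWhile (· == ' ')
      | some n => if n ≤ bl.length then bl.drop n else bl.dropWhile (· == ' '))
  let value :=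
    if style = '|' then PySem.Chars.strip (PySem.Chars.join ['\n'] norm)
    else PySem.Chars.strip (PySem.Chars.join [' ']
      ((norm.filter (fun x => PySem.Chars.strip x ≠ [])).map PySem.Chars.strip))
  List.replicate indent ' ' ++ key ++ [':', ' ', '"'] ++ pvEscape value ++ ['"']

-- ===== PORT A =====
-- A's inner 'while j < len(lines)' scan of a block body (returns block_lines and the unconsumed suffix)
def pvTakeBlock (indent : Nat) : List (List Char) → List (List Char) × List (List Char)
  | [] => ([], [])
  | nxt :: rest =>
    if PySem.Chars.strip nxt = [] then
      let p := pvTakeBlock indent rest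
      ([] :: p.1, p.2)
    else if pvCountIndent nxt ≤ indent then ([], nxt :: rest)
    else
      let p := pvTakeBlock indent rest
      (nxt :: p.1, p.2)

theorem pvTakeBlock_snd_le (indent : Nat) (ls : List (List Char)) :
    (pvTakeBlock indent ls).2.length ≤ ls.length := by
  induction ls with
  | nil => simp [pvTakeBlock]
  | cons x t ih =>
    simp only [pvTakeBlock]
    split_ifs <;> simp <;> omega

-- A's outer 'while i < len(lines)' loop (split(":",1) hand-ported as takeWhile/dropWhile at the first ':', exact since ':' is present)
def pvProcA : List (List Char) → List (List Char)
  | [] => []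
  | raw :: rest =>
    let stripped := raw.dropWhile (· == ' ')
    let indent := pvCountIndent raw
    if stripped = [] ∨ PySem.Chars.startswith stripped ['#'] then raw :: pvProcA rest
    else if ¬ PySem.Chars.isIn [':'] stripped then raw :: pvProcA rest
    else
      let key := PySem.Chars.strip (stripped.takeWhile (fun c => c ≠ ':'))
      let rest1 := ((stripped.dropWhile (fun c => c ≠ ':')).tail).dropWhile (· == ' ')
      match rest1 with
      | c :: _ =>
        if key ≠ [] ∧ (c = '|' ∨ c = '>') then
          let p := pvTakeBlock indent rest
          pvEmit indent key c p.1 :: pvProcA p.2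
        else raw :: pvProcA rest
      | [] => raw :: pvProcA rest
termination_by ls => ls.length
decreasing_by
  all_goals (have := pvTakeBlock_snd_le (pvCountIndent raw) rest; simp; try omega)

def collapse_block_scalars_py (frontmatter : String) : String :=
  String.mk (PySem.Chars.join ['\n']
    (pvProcA ((PySem.Str.splitlines frontmatter).map String.toList)) ++ ['\n'])

-- ===== PORT B =====
-- _classify: does this line open a block scalar? (indent, key, style) or none
def pvClassify (raw : List Char) : Option (Nat × List Char × Char) :=
  let stripped := raw.dropWhile (· == ' ')
  if stripped = [] ∨ PySem.Chars.startswith stripped ['#'] then none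
  else if ¬ PySem.Chars.isIn [':'] stripped then none
  else
    let key := PySem.Chars.strip (stripped.takeWhile (fun c => c ≠ ':'))
    let rest1 := ((stripped.dropWhile (fun c => c ≠ ':')).tail).dropWhile (· == ' ')
    match rest1 with
    | c :: _ =>
      if key ≠ [] ∧ (c = '|' ∨ c = '>') then some (pvCountIndent raw, key, c)
      else none
    | [] => none

-- state: (out, optional open block (indent, key, style, body-lines so far))
def pvScan (out : List (List Char)) (line : List Char) :
    List (List Char) × Option (Nat × List Char × Char × List (List Char)) :=
  match pvClassify line with
  | some (ind, key, sty) => (out, some (ind, key, sty, []))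
  | none => (out ++ [line], none)

def pvStep (st : List (List Char) × Option (Nat × List Char × Char × List (List Char)))
    (line : List Char) :
    List (List Char) × Option (Nat × List Char × Char × List (List Char)) :=
  match st.2 with
  | none => pvScan st.1 line
  | some (ind, key, sty, acc) =>
    if PySem.Chars.strip line = [] then (st.1, some (ind, key, sty, acc ++ [([] : List Char)]))
    else if pvCountIndent line ≤ ind then pvScan (st.1 ++ [pvEmit ind key sty acc]) line
    else (st.1, some (ind, key, sty, acc ++ [line]))

def pvFlush (st : List (List Char) × Option (Nat × List Char × Char × List (List Char))) :
    List (List Char) :=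
  match st.2 with
  | none => st.1
  | some (ind, key, sty, acc) => st.1 ++ [pvEmit ind key sty acc]

def collapse_block_scalars_py_alt (frontmatter : String) : String :=
  String.mk (PySem.Chars.join ['\n']
    (pvFlush (((PySem.Str.splitlines frontmatter).map String.toList).foldl pvStep ([], none)))
    ++ ['\n'])

-- ===== PRECONDITION & SPEC =====
def Spec_collapse_block_scalars_py (frontmatter : String) (out : String) : Prop := out = collapse_block_scalars_py_alt frontmatter
instance (frontmatter : String) (out : String) : Decidable (Spec_collapse_block_scalars_py frontmatter out) := by unfold Spec_collapse_block_scalars_py; infer_instance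

-- ===== CLAIM (what is proved, stated in full; the proofs are below) =====
def Claim_equal_collapse_block_scalars_py : Prop := ∀ (frontmatter : String), Dom_collapse_block_scalars_py frontmatter → Spec_collapse_block_scalars_py frontmatter (collapse_block_scalars_py frontmatter)

-- ===== LEMMAS AND PROOFS =====

-- evaluating A's line-classification cascade: the plain-line branches …
theorem pvProcA_classify_none (raw : List Char) (rest : List (List Char))
    (hc : pvClassify raw = none) : pvProcA (raw :: rest) = raw :: pvProcA rest := by
  rw [pvProcA]
  by_cases h1 : raw.dropWhile (· == ' ') = [] ∨
      PySem.Chars.startswith (raw.dropWhile (· == ' ')) ['#'] = true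
  · simp only [h1, if_pos]
  · rw [if_neg h1]
    by_cases h2 : ¬ PySem.Chars.isIn [':'] (raw.dropWhile (· == ' ')) = true
    · rw [if_pos h2]
    · rw [if_neg h2]
      cases hr : (((raw.dropWhile (· == ' ')).dropWhile (fun c => c ≠ ':')).tail).dropWhile
          (· == ' ') with
      | nil => simp only [hr]
      | cons c tl =>
        simp only [hr]
        by_cases h3 : PySem.Chars.strip ((raw.dropWhile (· == ' ')).takeWhile
            (fun c => c ≠ ':')) ≠ [] ∧ (c = '|' ∨ c = '>')
        · exfalso
          simp only [pvClassify, if_neg h1, if_neg h2, hr, if_pos h3] at hc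
          simp at hc
        · rw [if_neg h3]

-- … and the block-opening branch
theorem pvProcA_classify_some (raw : List Char) (rest : List (List Char))
    (ind : Nat) (key : List Char) (sty : Char)
    (hc : pvClassify raw = some (ind, key, sty)) :
    pvProcA (raw :: rest) =
      pvEmit ind key sty (pvTakeBlock ind rest).1 :: pvProcA (pvTakeBlock ind rest).2 := by
  rw [pvProcA]
  by_cases h1 : raw.dropWhile (· == ' ') = [] ∨
      PySem.Chars.startswith (raw.dropWhile (· == ' ')) ['#'] = true
  · exfalso; simp only [pvClassify, if_pos h1] at hc; simp at hc
  · rw [if_neg h1]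
    by_cases h2 : ¬ PySem.Chars.isIn [':'] (raw.dropWhile (· == ' ')) = true
    · exfalso; simp only [pvClassify, if_neg h1, if_pos h2] at hc
      simp at hc
    · rw [if_neg h2]
      cases hr : (((raw.dropWhile (· == ' ')).dropWhile (fun c => c ≠ ':')).tail).dropWhile
          (· == ' ') with
      | nil =>
        exfalso; simp only [pvClassify, if_neg h1, if_neg h2, hr] at hc
        simp at hc
      | cons c tl =>
        simp only [hr]
        by_cases h3 : PySem.Chars.strip ((raw.dropWhile (· == ' ')).takeWhile
            (fun c => c ≠ ':')) ≠ [] ∧ (c = '|' ∨ c = '>')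
        · rw [if_pos h3]
          simp only [pvClassify, if_neg h1, if_neg h2, hr, if_pos h3,
            Option.some.injEq, Prod.mk.injEq] at hc
          obtain ⟨e1, e2, e3⟩ := hc
          subst e1; subst e2; subst e3; rfl
        · exfalso; simp only [pvClassify, if_neg h1, if_neg h2, hr, if_neg h3] at hc
          simp at hc

-- B in block mode runs A's block scan: the fold consumes exactly pvTakeBlock's prefix,
-- flushes the collapsed line and re-enters scan mode on the boundary line.
theorem pvFold_block (ls : List (List Char)) :
    ∀ (out : List (List Char)) (ind : Nat) (key : List Char) (sty : Char)
      (acc : List (List Char)),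
      pvFlush (ls.foldl pvStep (out, some (ind, key, sty, acc))) =
      pvFlush ((pvTakeBlock ind ls).2.foldl pvStep
        (out ++ [pvEmit ind key sty (acc ++ (pvTakeBlock ind ls).1)], none)) := by
  induction ls with
  | nil => intro out ind key sty acc; simp [pvTakeBlock, pvFlush]
  | cons nxt rest ih =>
    intro out ind key sty acc
    by_cases h1 : PySem.Chars.strip nxt = []
    · have e1 : pvTakeBlock ind (nxt :: rest) =
          (([] : List Char) :: (pvTakeBlock ind rest).1, (pvTakeBlock ind rest).2) := by
        simp [pvTakeBlock, h1]
      have e2 : pvStep (out, some (ind, key, sty, acc)) nxt =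
          (out, some (ind, key, sty, acc ++ [([] : List Char)])) := by
        simp [pvStep, h1]
      rw [List.foldl_cons, e2, ih, e1]
      simp
    · by_cases h2 : pvCountIndent nxt ≤ ind
      · have e1 : pvTakeBlock ind (nxt :: rest) = ([], nxt :: rest) := by
          simp [pvTakeBlock, h1, h2]
        have e2 : pvStep (out, some (ind, key, sty, acc)) nxt =
            pvScan (out ++ [pvEmit ind key sty acc]) nxt := by
          simp [pvStep, h1, h2]
        rw [List.foldl_cons, e2, e1]
        simp only [List.append_nil, List.foldl_cons]
        rfl
      · have e1 : pvTakeBlock ind (nxt :: rest) =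
            (nxt :: (pvTakeBlock ind rest).1, (pvTakeBlock ind rest).2) := by
          simp [pvTakeBlock, h1, h2]
        have e2 : pvStep (out, some (ind, key, sty, acc)) nxt =
            (out, some (ind, key, sty, acc ++ [nxt])) := by
          simp [pvStep, h1, h2]
        rw [List.foldl_cons, e2, ih, e1]
        simp

-- main invariant: B's fold-with-flush from scan mode computes A's output
theorem pvFold_eq_procA : ∀ (n : Nat) (ls : List (List Char)), ls.length ≤ n →
    ∀ (out : List (List Char)),
      pvFlush (ls.foldl pvStep (out, none)) = out ++ pvProcA ls := by
  intro n
  induction n with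
  | zero =>
    intro ls h out
    have : ls = [] := List.eq_nil_of_length_eq_zero (Nat.le_zero.mp h)
    subst this; simp [pvFlush, pvProcA]
  | succ n ih =>
    intro ls h out
    match ls with
    | [] => simp [pvFlush, pvProcA]
    | raw :: rest =>
      simp only [List.length_cons, Nat.succ_le_succ_iff] at h
      have hstep : pvStep (out, none) raw = pvScan out raw := rfl
      rw [List.foldl_cons, hstep]
      cases hc : pvClassify raw with
      | none =>
        rw [pvScan, hc, ih rest h, pvProcA_classify_none raw rest hc]
        simp
      | some t =>
        obtain ⟨ind, key, sty⟩ := t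
        rw [pvScan, hc, pvFold_block]
        have hlen : (pvTakeBlock ind rest).2.length ≤ n :=
          le_trans (pvTakeBlock_snd_le _ _) h
        rw [ih _ hlen, pvProcA_classify_some raw rest ind key sty hc]
        simp

-- ===== VERDICT (by name: the statement is the Claim_ definition above) =====
theorem collapse_block_scalars_py_spec : Claim_equal_collapse_block_scalars_py := by
  intro fm _
  unfold Spec_collapse_block_scalars_py collapse_block_scalars_py collapse_block_scalars_py_alt
  rw [pvFold_eq_procA ((PySem.Str.splitlines fm).map String.toList).length _ le_rfl]
  simp
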